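-- pv_equiv track=rewrite | github.com/VenkataPagadalaGIT/united-rehabs-3 | backend/improved_serp_validator.py | filter_by_population
-- ===== SOURCE A (Python) =====
-- from typing import Dict, List, Optional, Tuple
--
-- COUNTRY_POPULATION_RANGES = {
--     'USA': (50000, 200000),  # ~70K-110K deaths reasonable
--     'CAN': (2000, 15000),    # ~4K-8K deaths
--     'GBR': (2000, 10000),    # ~4K-5K deaths
--     'DEU': (500, 5000),      # ~1.5K-2K deaths
--     'FRA': (200, 2000),      # ~500-700 deaths
--     'ITA': (100, 1000),      # ~200-300 deaths
--     'ESP': (500, 3000),      # ~1K deaths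
--     'AUS': (500, 5000),      # ~1.5K-2K deaths
--     'JPN': (50, 500),        # Very low, strict drug laws
--     'NLD': (100, 1000),      # ~300-400 deaths
--     'SWE': (200, 2000),      # ~900-1K deaths (high per capita)
--     'NOR': (100, 1000),      # ~300-400 deaths
--     'CHE': (50, 500),        # ~150-200 deaths
--     'IRL': (200, 1000),      # ~400-500 deaths
--     'NZL': (50, 500),        # ~150 deaths
-- }
--
-- def filter_by_population(numbers: List[int], country_code: str) -> Optional[int]:
--     """Filter numbers by expected population range."""
--     if not numbers:
--         return None
--
--     pop_range = COUNTRY_POPULATION_RANGES.get(country_code, (50, 200000))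
--     min_val, max_val = pop_range
--
--     valid_numbers = [n for n in numbers if min_val <= n <= max_val]
--
--     if not valid_numbers:
--         return None
--
--     # Return median
--     valid_numbers.sort()
--     return valid_numbers[len(valid_numbers) // 2]
-- ===== SOURCE B (Python) =====
-- COUNTRY_POPULATION_RANGES = {
--     'USA': (50000, 200000),
--     'CAN': (2000, 15000),
--     'GBR': (2000, 10000),
--     'DEU': (500, 5000),
--     'FRA': (200, 2000),
--     'ITA': (100, 1000),
--     'ESP': (500, 3000),
--     'AUS': (500, 5000),
--     'JPN': (50, 500),
--     'NLD': (100, 1000),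
--     'SWE': (200, 2000),
--     'NOR': (100, 1000),
--     'CHE': (50, 500),
--     'IRL': (200, 1000),
--     'NZL': (50, 500),
-- }
--
--
-- def filter_by_population(numbers, country_code):
--     """Filter numbers by expected population range; return the upper median
--     (the len//2-th order statistic) via quickselect instead of sorting (alternative algorithm)."""
--     min_val, max_val = COUNTRY_POPULATION_RANGES.get(country_code, (50, 200000))
--     xs = [n for n in numbers if min_val <= n <= max_val]
--     if not xs:
--         return None
--     k = len(xs) // 2
--     while True:
--         p = xs[len(xs) // 2]
--         lt = [x for x in xs if x < p]
--         if k < len(lt):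
--             xs = lt
--             continue
--         eq = sum(1 for x in xs if x == p)
--         if k < len(lt) + eq:
--             return p
--         k -= len(lt) + eq
--         xs = [x for x in xs if x > p]
-- ===== Notes on version B (the rewrite author's own statement) =====
-- stated objective: alternative
-- what changed: Replaces sort-then-index median extraction by a quickselect loop (three-way partition around the head pivot) that finds the len//2-th order statistic of the filtered list without sorting (O(n) expected vs O(n log n)).
import Mathlib
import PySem

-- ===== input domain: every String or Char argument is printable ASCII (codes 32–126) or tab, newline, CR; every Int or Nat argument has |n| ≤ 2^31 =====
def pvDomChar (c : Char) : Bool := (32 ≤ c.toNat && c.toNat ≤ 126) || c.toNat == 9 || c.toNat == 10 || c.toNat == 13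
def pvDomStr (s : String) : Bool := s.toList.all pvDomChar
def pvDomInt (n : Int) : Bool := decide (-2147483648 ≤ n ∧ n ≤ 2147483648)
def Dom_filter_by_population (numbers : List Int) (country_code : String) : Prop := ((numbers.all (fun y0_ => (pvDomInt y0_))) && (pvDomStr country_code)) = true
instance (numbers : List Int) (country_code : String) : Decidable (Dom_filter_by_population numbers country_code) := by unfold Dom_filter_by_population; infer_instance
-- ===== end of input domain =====

-- B replaces A's sort-then-index median by a quickselect of the len//2-th order
-- statistic of the filtered list (objective: alternative algorithm, no sort).

-- ===== PORT A =====
def pvRangesA : PySem.Dict String (Int × Int) := PySem.Dict.ofList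
  [("USA", (50000, 200000)), ("CAN", (2000, 15000)), ("GBR", (2000, 10000)),
   ("DEU", (500, 5000)), ("FRA", (200, 2000)), ("ITA", (100, 1000)),
   ("ESP", (500, 3000)), ("AUS", (500, 5000)), ("JPN", (50, 500)),
   ("NLD", (100, 1000)), ("SWE", (200, 2000)), ("NOR", (100, 1000)),
   ("CHE", (50, 500)), ("IRL", (200, 1000)), ("NZL", (50, 500))]

def filter_by_population (numbers : List Int) (country_code : String) : Option Int :=
  if numbers = [] then none
  else
    let pop_range := PySem.Dict.getD pvRangesA country_code (50, 200000)
    let min_val := pop_range.1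
    let max_val := pop_range.2
    let valid_numbers := numbers.filter (fun n => decide (min_val ≤ n) && decide (n ≤ max_val))
    if valid_numbers = [] then none
    else
      let s := PySem.List.sorted valid_numbers (fun x => x) false
      PySem.List.pyGet? s (PySem.Int.floordiv (s.length : Int) 2)

-- ===== PORT B =====
def pvRangesB : PySem.Dict String (Int × Int) := PySem.Dict.ofList
  [("USA", (50000, 200000)), ("CAN", (2000, 15000)), ("GBR", (2000, 10000)),
   ("DEU", (500, 5000)), ("FRA", (200, 2000)), ("ITA", (100, 1000)),
   ("ESP", (500, 3000)), ("AUS", (500, 5000)), ("JPN", (50, 500)),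
   ("NLD", (100, 1000)), ("SWE", (200, 2000)), ("NOR", (100, 1000)),
   ("CHE", (50, 500)), ("IRL", (200, 1000)), ("NZL", (50, 500))]

-- the while-loop of Source B as structural recursion (xs shrinks strictly each turn)
def qselB : List Int → Nat → Option Int
  | [], _ => none
  | h :: t, k =>
    -- xs[len(xs) // 2]: the index is always in range, so the getD default is never used
    let p := (h :: t).getD ((h :: t).length / 2) h
    let lt := (h :: t).filter (fun x => decide (x < p))
    if k < lt.length then qselB lt k
    else
      let eq := (h :: t).countP (fun x => x == p)
      if k < lt.length + eq then some p
      else qselB ((h :: t).filter (fun x => decide (p < x))) (k - (lt.length + eq))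
termination_by xs _ => xs.length
decreasing_by
  all_goals
    refine List.length_filter_lt_length_iff_exists.mpr
      ⟨p, ?_, by simp only [decide_eq_true_eq]; exact lt_irrefl p⟩
    show (h :: t).getD ((h :: t).length / 2) h ∈ h :: t
    rw [List.getD_eq_getElem _ _ (by simp only [List.length_cons]; omega)]
    exact List.getElem_mem _

def filter_by_population_alt (numbers : List Int) (country_code : String) : Option Int :=
  let pr := PySem.Dict.getD pvRangesB country_code (50, 200000)
  let xs := numbers.filter (fun n => decide (pr.1 ≤ n) && decide (n ≤ pr.2))
  if xs = [] then none
  else qselB xs (xs.length / 2)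

-- ===== PRECONDITION & SPEC =====
def Spec_filter_by_population (numbers : List Int) (country_code : String) (out : Option Int) : Prop := out = filter_by_population_alt numbers country_code
instance (numbers : List Int) (country_code : String) (out : Option Int) : Decidable (Spec_filter_by_population numbers country_code out) := by unfold Spec_filter_by_population; infer_instance

-- ===== CLAIM (what is proved, stated in full; the proofs are below) =====
def Claim_equal_filter_by_population : Prop := ∀ (numbers : List Int) (country_code : String), Dom_filter_by_population numbers country_code → Spec_filter_by_population numbers country_code (filter_by_population numbers country_code)

-- ===== LEMMAS AND PROOFS =====

-- sorted xs decomposes around a pivot p into (sorted lt) ++ (count copies of p) ++ (sorted gt)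
lemma sorted_pivot_decomp (xs : List Int) (p : Int) :
    PySem.List.sorted xs (fun x => x) false =
      PySem.List.sorted (xs.filter (fun x => decide (x < p))) (fun x => x) false
      ++ List.replicate (xs.countP (fun x => x == p)) p
      ++ PySem.List.sorted (xs.filter (fun x => decide (p < x))) (fun x => x) false := by
  apply PySem.List.sorted_id_eq_of_perm_of_pairwise
  · -- permutation
    have hrep : List.replicate (xs.countP (fun x => x == p)) p
        = xs.filter (fun x => x == p) := by
      rw [← List.count_eq_countP, List.filter_beq]
    set q : Int → Bool := fun x => decide (x < p) with hq
    have h1 : (xs.filter q ++ xs.filter (fun x => !q x)).Perm xs :=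
      List.filter_append_perm q xs
    set F : List Int := xs.filter (fun x => !q x) with hF
    have h2 : (F.filter (fun x => x == p) ++ F.filter (fun x => !(x == p))).Perm F :=
      List.filter_append_perm _ F
    have hFeq : F.filter (fun x => x == p) = xs.filter (fun x => x == p) := by
      rw [hF, List.filter_filter]
      apply List.filter_congr
      intro x _
      by_cases hx : x = p <;> simp [hx, hq]
    have hFgt : F.filter (fun x => !(x == p)) = xs.filter (fun x => decide (p < x)) := by
      rw [hF, List.filter_filter]
      apply List.filter_congr
      intro x _
      by_cases hx : x = p
      · simp [hx, hq]
      · by_cases h2 : x < p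
        · simp [hq, h2]; omega
        · simp [hq, hx, h2, (by omega : p < x)]
    have hsG : (PySem.List.sorted (xs.filter (fun x => decide (p < x))) (fun x => x) false).Perm
        (F.filter (fun x => !(x == p))) := by
      rw [hFgt]; exact PySem.List.sorted_perm _ _ _
    have step : (PySem.List.sorted (xs.filter q) (fun x => x) false
        ++ List.replicate (xs.countP (fun x => x == p)) p
        ++ PySem.List.sorted (xs.filter (fun x => decide (p < x))) (fun x => x) false).Perm
        (xs.filter q ++ F) := by
      rw [List.append_assoc]
      refine List.Perm.append (PySem.List.sorted_perm _ _ _) ?_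
      rw [hrep, ← hFeq]
      exact ((List.Perm.refl _).append hsG).trans h2
    exact step.trans h1
  · -- pairwise
    rw [List.append_assoc, List.pairwise_append]
    refine ⟨PySem.List.sorted_pairwise _ _, ?_, ?_⟩
    · rw [List.pairwise_append]
      refine ⟨List.pairwise_replicate.mpr (Or.inr le_rfl), PySem.List.sorted_pairwise _ _, ?_⟩
      intro a ha b hb
      have ha' := List.eq_of_mem_replicate ha
      have hb' : p < b := by
        have h := List.of_mem_filter ((PySem.List.mem_sorted _ _ _ b).mp hb)
        simpa using h
      omega
    · intro a ha b hb
      have ha' : a < p := by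
        have h := List.of_mem_filter ((PySem.List.mem_sorted _ _ _ a).mp ha)
        simpa using h
      rcases List.mem_append.mp hb with hb | hb
      · have := List.eq_of_mem_replicate hb; omega
      · have hb' : p < b := by
          have h := List.of_mem_filter ((PySem.List.mem_sorted _ _ _ b).mp hb)
          simpa using h
        omega

-- quickselect computes the k-th element of the sorted list
lemma qselB_correct (n : Nat) : ∀ (xs : List Int), xs.length = n → ∀ k, k < xs.length →
    qselB xs k = (PySem.List.sorted xs (fun x => x) false)[k]? := by
  induction n using Nat.strong_induction_on with
  | _ n IH =>
    intro xs hn k hk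
    match xs with
    | [] => simp at hk
    | h :: t =>
      rw [qselB]
      simp only []
      set p := (h :: t).getD ((h :: t).length / 2) h with hp
      have hpmem : p ∈ h :: t := by
        rw [hp, List.getD_eq_getElem _ _ (by simp only [List.length_cons]; omega)]
        exact List.getElem_mem _
      have hdec := sorted_pivot_decomp (h :: t) p
      set L := (h :: t).filter (fun x => decide (x < p)) with hL
      set E := (h :: t).countP (fun x => x == p) with hE
      set G := (h :: t).filter (fun x => decide (p < x)) with hG
      set sL := PySem.List.sorted L (fun x => x) false with hsL
      set sG := PySem.List.sorted G (fun x => x) false with hsG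
      have hsLlen : sL.length = L.length := PySem.List.length_sorted _ _ _
      have hsGlen : sG.length = G.length := PySem.List.length_sorted _ _ _
      have hLt : L.length < (h :: t).length := by
        rw [hL]
        exact List.length_filter_lt_length_iff_exists.mpr
          ⟨p, hpmem, by simp only [decide_eq_true_eq]; exact lt_irrefl p⟩
      have hGt : G.length < (h :: t).length := by
        rw [hG]
        exact List.length_filter_lt_length_iff_exists.mpr
          ⟨p, hpmem, by simp only [decide_eq_true_eq]; exact lt_irrefl p⟩
      have hlen : L.length + E + G.length = (h :: t).length := by
        have h := congrArg List.length hdec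
        simp only [PySem.List.length_sorted, List.length_append, List.length_replicate] at h
        omega
      rw [hdec]
      by_cases h1 : k < L.length
      · rw [if_pos h1,
            List.getElem?_append_left (by simp only [List.length_append, List.length_replicate, hsLlen]; omega),
            List.getElem?_append_left (by simp only [hsLlen]; omega)]
        exact IH L.length (by omega) L rfl k h1
      · rw [if_neg h1]
        by_cases h2 : k < L.length + E
        · rw [if_pos h2,
              List.getElem?_append_left (by simp only [List.length_append, List.length_replicate, hsLlen]; omega),
              List.getElem?_append_right (by simp only [hsLlen]; omega), List.getElem?_replicate,
              if_pos (by simp only [hsLlen]; omega)]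
        · rw [if_neg h2,
              List.getElem?_append_right (by simp only [List.length_append, List.length_replicate, hsLlen]; omega)]
          have heq : k - (sL ++ List.replicate E p).length = k - (L.length + E) := by
            simp only [List.length_append, List.length_replicate, hsLlen]
          rw [heq]
          exact IH G.length (by omega) G rfl (k - (L.length + E)) (by omega)

-- ===== VERDICT (by name: the statement is the Claim_ definition above) =====
theorem filter_by_population_spec : Claim_equal_filter_by_population := by
  intro numbers country_code _
  unfold Spec_filter_by_population filter_by_population filter_by_population_alt
  simp only []
  have hr : pvRangesA = pvRangesB := rfl
  rw [hr]
  by_cases hnil : numbers = []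
  · simp [hnil]
  · rw [if_neg hnil]
    set valid := numbers.filter (fun n =>
      decide ((PySem.Dict.getD pvRangesB country_code (50, 200000)).1 ≤ n) &&
      decide (n ≤ (PySem.Dict.getD pvRangesB country_code (50, 200000)).2)) with hv
    by_cases hve : valid = []
    · rw [if_pos hve, if_pos hve]
    · rw [if_neg hve, if_neg hve]
      have hlen : (PySem.List.sorted valid (fun x => x) false).length = valid.length :=
        PySem.List.length_sorted _ _ _
      rw [hlen]
      have hfd : PySem.Int.floordiv ((valid.length : Nat) : Int) 2 = ((valid.length / 2 : Nat) : Int) := by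
        exact_mod_cast PySem.Int.floordiv_natCast valid.length 2
      rw [hfd, PySem.List.pyGet?_natCast]
      have hk : valid.length / 2 < valid.length :=
        Nat.div_lt_self (List.length_pos_of_ne_nil hve) (by norm_num)
      exact (qselB_correct valid.length valid rfl _ hk).symm
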